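-- pv_equiv track=rewrite | github.com/mon-jai/Python | homework/q43.py | filter_colleges
-- ===== SOURCE A (Python) =====
-- from typing import Dict, Tuple
-- from collections import OrderedDict
--
-- def filter_colleges(
--     colleges_to_characteristics: Dict[str, Tuple[str, ...]], requirements: str
-- ):
--     result: Dict[str, int] = OrderedDict()
--
--     for college, characteristics in colleges_to_characteristics.items():
--         matches = 0
--
--         for requirement_group in map(
--             lambda s: s.strip(),
--             requirements.split('+')
--         ):
--             match = True
--
--             for requirement in map(
--                 lambda s: s.strip(),
--                 requirement_group.split(' ')
--             ):
--                 if requirement.startswith('!'):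
--                     if requirement[1:] in characteristics:
--                         match = False
--                         break
--                 else:
--                     if requirement not in characteristics:
--                         match = False
--                         break
--
--             if match:
--                 matches += 1
--
--         if matches > 0:
--             result[college] = matches
--
--     return result
-- ===== SOURCE B (Python) =====
-- from collections import OrderedDict
--
--
-- def filter_colleges(colleges_to_characteristics, requirements):
--     # Parse the requirements ONCE into (positives, negatives) set pairs.
--     groups = []
--     for group in requirements.split('+'):
--         positives, negatives = set(), set()
--         for token in group.strip().split(' '):
--             token = token.strip()
--             if token.startswith('!'):
--                 negatives.add(token[1:])
--             else:
--                 positives.add(token)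
--         groups.append((positives, negatives))
--
--     result = OrderedDict()
--     for college, characteristics in colleges_to_characteristics.items():
--         chars = set(characteristics)
--         count = sum(1 for pos, neg in groups
--                     if pos <= chars and neg.isdisjoint(chars))
--         if count:
--             result[college] = count
--     return result
-- ===== Notes on version B (the rewrite author's own statement) =====
-- stated objective: faster
-- what changed: Parses the requirements string once into (positive-set, negative-set) pairs and tests each college's characteristic set with subset/disjoint checks, instead of re-splitting and re-stripping the requirements per college and scanning the characteristics tuple linearly per token.
import Mathlib
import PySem

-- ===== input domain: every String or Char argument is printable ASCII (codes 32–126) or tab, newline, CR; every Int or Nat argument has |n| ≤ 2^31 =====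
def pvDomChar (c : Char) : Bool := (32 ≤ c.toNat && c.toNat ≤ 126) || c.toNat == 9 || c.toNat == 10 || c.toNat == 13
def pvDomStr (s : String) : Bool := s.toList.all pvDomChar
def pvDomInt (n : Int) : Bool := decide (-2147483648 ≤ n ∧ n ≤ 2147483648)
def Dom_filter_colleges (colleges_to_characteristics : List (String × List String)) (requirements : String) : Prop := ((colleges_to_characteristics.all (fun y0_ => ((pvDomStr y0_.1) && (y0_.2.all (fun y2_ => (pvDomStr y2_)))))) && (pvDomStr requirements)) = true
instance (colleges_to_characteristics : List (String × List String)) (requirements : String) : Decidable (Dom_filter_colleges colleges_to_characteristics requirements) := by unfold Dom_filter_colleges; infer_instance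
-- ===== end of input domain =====

-- B parses the requirements once into (positive,negative) set pairs and tests each college's
-- characteristic set by subset/disjointness, instead of re-splitting the string per college and
-- scanning the characteristics tuple per token; measurably faster.


-- ===== PORT A =====
-- literal transliteration of A: per college, re-split the requirements, per group a
-- break-style flag loop over the stripped tokens scanning the characteristics list.
def filter_colleges (colleges_to_characteristics : List (String × List String)) (requirements : String) : List (String × Int) :=
  (colleges_to_characteristics.foldl
    (fun (result : PySem.Dict String Int) cc =>
      let characteristics := cc.2
      let m_ : Int :=
        (((PySem.Str.split? requirements "+").getD []).map PySem.Str.strip).foldl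
          (fun m_ requirement_group =>
            let mtch : Bool :=
              (((PySem.Str.split? requirement_group " ").getD []).map PySem.Str.strip).foldl
                (fun (mtch : Bool) requirement =>
                  if mtch then
                    if PySem.Str.startswith requirement "!" then
                      (if characteristics.contains (PySem.Str.slice requirement (some 1) none) then false else mtch)
                    else
                      (if characteristics.contains requirement then mtch else false)
                  else mtch)  -- after "break" nothing else runs in the Python loop
                true
            if mtch then m_ + 1 else m_)
          0
      if 0 < m_ then result.insert cc.1 m_ else result)
    PySem.Dict.empty).items

-- ===== PORT B =====
-- Source B: parse one group into its (positives, negatives) pair of sets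
def pvParseGroup (group : String) : PySem.Set String × PySem.Set String :=
  ((PySem.Str.split? (PySem.Str.strip group) " ").getD []).foldl
    (fun (pn : PySem.Set String × PySem.Set String) token0 =>
      let token := PySem.Str.strip token0
      if PySem.Str.startswith token "!" then
        (pn.1, pn.2.add (PySem.Str.slice token (some 1) none))
      else
        (pn.1.add token, pn.2))
    (PySem.Set.empty, PySem.Set.empty)

def filter_colleges_alt (colleges_to_characteristics : List (String × List String)) (requirements : String) : List (String × Int) :=
  let groups := ((PySem.Str.split? requirements "+").getD []).map pvParseGroup
  (colleges_to_characteristics.foldl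
    (fun (result : PySem.Dict String Int) cc =>
      let chars : PySem.Set String := PySem.Set.ofList cc.2
      let count : Int :=
        (groups.countP (fun pn => pn.1.issubset chars && pn.2.isdisjoint chars) : Nat)
      if count ≠ 0 then result.insert cc.1 count else result)
    PySem.Dict.empty).items

-- ===== PRECONDITION & SPEC =====
def Spec_filter_colleges (colleges_to_characteristics : List (String × List String)) (requirements : String) (out : List (String × Int)) : Prop := out = filter_colleges_alt colleges_to_characteristics requirements
instance (colleges_to_characteristics : List (String × List String)) (requirements : String) (out : List (String × Int)) : Decidable (Spec_filter_colleges colleges_to_characteristics requirements out) := by unfold Spec_filter_colleges; infer_instance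

-- ===== CLAIM (what is proved, stated in full; the proofs are below) =====
def Claim_equal_filter_colleges : Prop := ∀ (colleges_to_characteristics : List (String × List String)) (requirements : String), Dom_filter_colleges colleges_to_characteristics requirements → Spec_filter_colleges colleges_to_characteristics requirements (filter_colleges colleges_to_characteristics requirements)

-- ===== LEMMAS AND PROOFS =====

-- whether one (already stripped) token is satisfied by the characteristics list
def pvTokOK (characteristics : List String) (t : String) : Bool :=
  if PySem.Str.startswith t "!" then
    !(characteristics.contains (PySem.Str.slice t (some 1) none))
  else characteristics.contains t

-- A's inner break-loop: the flag fold is just "all tokens satisfied"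
lemma pvFlagFold (characteristics : List String) (ts : List String) (b : Bool) :
    ts.foldl
      (fun (mtch : Bool) requirement =>
        if mtch then
          if PySem.Str.startswith requirement "!" then
            (if characteristics.contains (PySem.Str.slice requirement (some 1) none) then false else mtch)
          else
            (if characteristics.contains requirement then mtch else false)
        else mtch) b
    = (b && ts.all (pvTokOK characteristics)) := by
  induction ts generalizing b with
  | nil => simp
  | cons t ts ih =>
    simp only [List.foldl_cons, List.all_cons, ih, pvTokOK]
    cases b <;> by_cases h : PySem.Str.startswith t "!" = true <;>
      by_cases h2 : characteristics.contains (PySem.Str.slice t (some 1) none) = true <;>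
      by_cases h3 : characteristics.contains t = true <;> simp_all
-- B's token-classifying fold: adding one element to either set refines the subset/disjoint test
lemma pvSubAdd {s C : PySem.Set String} (x : String) :
    (s.add x).issubset C = (s.issubset C && decide (x ∈ C)) := by
  rw [Bool.eq_iff_iff]
  simp only [Bool.and_eq_true, decide_eq_true_eq, PySem.Set.issubset_iff]
  constructor
  · intro h
    exact ⟨fun y hy => h y ((PySem.Set.mem_add s x y).mpr (Or.inl hy)),
           h x ((PySem.Set.mem_add s x x).mpr (Or.inr rfl))⟩
  · rintro ⟨h1, h2⟩ y hy
    rcases (PySem.Set.mem_add s x y).mp hy with hy' | rfl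
    exacts [h1 y hy', h2]

lemma pvDisAdd {s C : PySem.Set String} (x : String) :
    (s.add x).isdisjoint C = (s.isdisjoint C && !decide (x ∈ C)) := by
  rw [Bool.eq_iff_iff]
  simp only [Bool.and_eq_true, Bool.not_eq_true', decide_eq_false_iff_not,
    PySem.Set.isdisjoint_iff]
  constructor
  · intro h
    exact ⟨fun y hy => h y ((PySem.Set.mem_add s x y).mpr (Or.inl hy)),
           h x ((PySem.Set.mem_add s x x).mpr (Or.inr rfl))⟩
  · rintro ⟨h1, h2⟩ y hy
    rcases (PySem.Set.mem_add s x y).mp hy with hy' | rfl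
    exacts [h1 y hy', h2]

-- B's token-classifying fold, one step at a time: the subset/disjoint test of the
-- accumulated pair absorbs each token as one conjunct
lemma pvTestStep (cl : List String) (pn : PySem.Set String × PySem.Set String)
    (ts : List String) :
    ((ts.foldl
        (fun (pn : PySem.Set String × PySem.Set String) token0 =>
          let token := PySem.Str.strip token0
          if PySem.Str.startswith token "!" then
            (pn.1, pn.2.add (PySem.Str.slice token (some 1) none))
          else
            (pn.1.add token, pn.2))
        pn).1.issubset (PySem.Set.ofList cl)
      && (ts.foldl
        (fun (pn : PySem.Set String × PySem.Set String) token0 =>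
          let token := PySem.Str.strip token0
          if PySem.Str.startswith token "!" then
            (pn.1, pn.2.add (PySem.Str.slice token (some 1) none))
          else
            (pn.1.add token, pn.2))
        pn).2.isdisjoint (PySem.Set.ofList cl))
    = ((pn.1.issubset (PySem.Set.ofList cl) && pn.2.isdisjoint (PySem.Set.ofList cl))
        && (ts.map PySem.Str.strip).all (pvTokOK cl)) := by
  induction ts generalizing pn with
  | nil => simp
  | cons t ts ih =>
    simp only [List.foldl_cons, List.map_cons, List.all_cons]
    by_cases h : PySem.Str.startswith (PySem.Str.strip t) "!" = true
    · simp only [h, if_true]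
      rw [ih, pvDisAdd, pvTokOK, if_pos h]
      simp only [PySem.Set.mem_ofList]
      cases hA : (pn.1.issubset (PySem.Set.ofList cl)) <;>
        cases hB : (pn.2.isdisjoint (PySem.Set.ofList cl)) <;>
        cases hC : decide (PySem.Str.slice (PySem.Str.strip t) (some 1) none ∈ cl) <;>
        simp_all
    · simp only [h, Bool.false_eq_true, if_false]
      rw [ih, pvSubAdd, pvTokOK, if_neg h]
      simp only [PySem.Set.mem_ofList]
      cases hA : (pn.1.issubset (PySem.Set.ofList cl)) <;>
        cases hB : (pn.2.isdisjoint (PySem.Set.ofList cl)) <;>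
        cases hC : decide (PySem.Str.strip t ∈ cl) <;>
        simp_all

-- per group: A's flag (all stripped tokens satisfied) equals B's test of the parsed group
lemma pvGroupEq (cl : List String) (g : String) :
    (((PySem.Str.split? (PySem.Str.strip g) " ").getD []).map PySem.Str.strip).all (pvTokOK cl)
    = ((pvParseGroup g).1.issubset (PySem.Set.ofList cl)
        && (pvParseGroup g).2.isdisjoint (PySem.Set.ofList cl)) := by
  unfold pvParseGroup
  rw [pvTestStep cl (PySem.Set.empty, PySem.Set.empty)]
  simp [PySem.Set.issubset_iff, PySem.Set.isdisjoint_iff, PySem.Set.empty]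

-- per college: A's counting fold over the stripped groups equals B's countP over the parsed groups
lemma pvCountEq (cl : List String) (requirements : String) :
    (((PySem.Str.split? requirements "+").getD []).map PySem.Str.strip).foldl
      (fun m_ requirement_group =>
        let mtch : Bool :=
          (((PySem.Str.split? requirement_group " ").getD []).map PySem.Str.strip).foldl
            (fun (mtch : Bool) requirement =>
              if mtch then
                if PySem.Str.startswith requirement "!" then
                  (if cl.contains (PySem.Str.slice requirement (some 1) none) then false else mtch)
                else
                  (if cl.contains requirement then mtch else false)
              else mtch)
            true
        if mtch then m_ + 1 else m_)
      (0 : Int)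
    = (((((PySem.Str.split? requirements "+").getD []).map pvParseGroup).countP
        (fun pn => pn.1.issubset (PySem.Set.ofList cl) && pn.2.isdisjoint (PySem.Set.ofList cl)) : Nat) : Int) := by
  have h1 : ∀ (k : Int) (l : List String),
      (l.map PySem.Str.strip).foldl
        (fun m_ requirement_group =>
          let mtch : Bool :=
            (((PySem.Str.split? requirement_group " ").getD []).map PySem.Str.strip).foldl
              (fun (mtch : Bool) requirement =>
                if mtch then
                  if PySem.Str.startswith requirement "!" then
                    (if cl.contains (PySem.Str.slice requirement (some 1) none) then false else mtch)
                  else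
                    (if cl.contains requirement then mtch else false)
                else mtch)
              true
          if mtch then m_ + 1 else m_) k
      = k + (((l.map pvParseGroup).countP
          (fun pn => pn.1.issubset (PySem.Set.ofList cl) && pn.2.isdisjoint (PySem.Set.ofList cl)) : Nat) : Int) := by
    intro k l
    induction l generalizing k with
    | nil => simp
    | cons x xs ihx =>
      simp only [List.map_cons, List.foldl_cons, List.countP_cons]
      rw [ihx]
      have hx : (((PySem.Str.split? (PySem.Str.strip x) " ").getD []).map PySem.Str.strip).foldl
          (fun (mtch : Bool) requirement =>
            if mtch then
              if PySem.Str.startswith requirement "!" then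
                (if cl.contains (PySem.Str.slice requirement (some 1) none) then false else mtch)
              else
                (if cl.contains requirement then mtch else false)
            else mtch)
          true
        = ((pvParseGroup x).1.issubset (PySem.Set.ofList cl)
            && (pvParseGroup x).2.isdisjoint (PySem.Set.ofList cl)) := by
        rw [pvFlagFold, Bool.true_and, pvGroupEq]
      simp only [hx]
      by_cases hb : ((pvParseGroup x).1.issubset (PySem.Set.ofList cl)
          && (pvParseGroup x).2.isdisjoint (PySem.Set.ofList cl)) = true <;>
        simp [hb] <;> omega
  have := h1 0 ((PySem.Str.split? requirements "+").getD [])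
  simpa using this

-- ===== VERDICT (by name: the statement is the Claim_ definition above) =====
theorem filter_colleges_spec : Claim_equal_filter_colleges := by
  intro cs req _
  show filter_colleges cs req = filter_colleges_alt cs req
  unfold filter_colleges filter_colleges_alt
  congr 1
  apply List.foldl_ext
  intro d cc _
  simp only [pvCountEq cc.2 req]
  split_ifs with h1 h2 <;> first | rfl | (exfalso; omega)
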